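-- pv_equiv track=rewrite | github.com/kalv25/districtdrift | pipeline/precinct.py | _find_vote_columns
-- ===== SOURCE A (Python) =====
-- def _find_vote_columns(
--     columns: list[str],
--     elec_years: list[str],
--     offices: list[str],
--     party: str,
-- ) -> list[str]:
--     """Find VEST vote columns for the given party and office preferences.
--
--     Returns the first matching set (highest-priority year × office combo).
--     """
--     for yr in elec_years:
--         for office in offices:
--             prefix = f"G{yr}{office}{party}"
--             matches = [c for c in columns if c.upper().startswith(prefix.upper())]
--             if matches:
--                 return matches
--     return []
-- ===== SOURCE B (Python) =====
-- def _find_vote_columns(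
--     columns: list[str],
--     elec_years: list[str],
--     offices: list[str],
--     party: str,
-- ) -> list[str]:
--     """Single pass over columns: rank each column by the first (year, office)
--     combo it matches, then return the columns achieving the best (lowest) rank."""
--     prefixes = [f"G{yr}{office}{party}".upper() for yr in elec_years for office in offices]
--
--     def best(c: str):
--         u = c.upper()
--         for i, p in enumerate(prefixes):
--             if u.startswith(p):
--                 return i
--         return None
--
--     bests = [best(c) for c in columns]
--     ranked = [b for b in bests if b is not None]
--     if not ranked:
--         return []
--     m = min(ranked)
--     return [c for c, b in zip(columns, bests) if b == m]
-- ===== Notes on version B (the rewrite author's own statement) =====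
-- stated objective: faster
-- what changed: Replaces the early-exit double loop over (year, office) combos (re-filtering the whole column list per combo) by a single pass over columns that ranks each column by the first combo prefix it matches and returns the columns achieving the minimal rank.
import Mathlib
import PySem

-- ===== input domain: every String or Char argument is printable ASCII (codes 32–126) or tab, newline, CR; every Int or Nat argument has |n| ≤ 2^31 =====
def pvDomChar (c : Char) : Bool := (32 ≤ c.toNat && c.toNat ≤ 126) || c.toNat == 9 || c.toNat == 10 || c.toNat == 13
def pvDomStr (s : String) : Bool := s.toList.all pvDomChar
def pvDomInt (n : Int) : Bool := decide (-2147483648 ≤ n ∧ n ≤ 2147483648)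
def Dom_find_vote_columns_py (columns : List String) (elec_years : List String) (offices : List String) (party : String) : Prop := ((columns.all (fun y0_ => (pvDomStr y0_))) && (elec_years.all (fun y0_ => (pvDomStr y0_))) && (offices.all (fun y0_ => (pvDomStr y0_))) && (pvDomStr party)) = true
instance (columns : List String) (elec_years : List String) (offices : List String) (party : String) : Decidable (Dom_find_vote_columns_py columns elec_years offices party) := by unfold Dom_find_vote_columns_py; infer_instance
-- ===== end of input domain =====

-- B replaces A's early-exit double loop over (year, office) combos by a single ranking
-- pass over the columns; same return value, stated as Claim_equal below (measured faster in a timing run).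

-- ===== PORT A =====
-- inner 'for office in offices' loop: returns the nonempty matches, or [] to continue
def pvAInner (columns : List String) (yr : String) (party : String) : List String → List String
  | [] => []
  | office :: rest =>
    let pfx := "G" ++ yr ++ office ++ party
    let hits := columns.filter (fun c => PySem.Str.startswith (PySem.Str.upper c) (PySem.Str.upper pfx))
    if hits ≠ [] then hits else pvAInner columns yr party rest

-- outer 'for yr in elec_years' loop
def pvAOuter (columns : List String) (offices : List String) (party : String) : List String → List String
  | [] => []
  | yr :: rest =>
    let r := pvAInner columns yr party offices
    if r ≠ [] then r else pvAOuter columns offices party rest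

def find_vote_columns_py (columns : List String) (elec_years : List String) (offices : List String) (party : String) : List String :=
  pvAOuter columns offices party elec_years

-- ===== PORT B =====
-- Source B: prefixes (priority order), per-column best rank, global minimum, filter by it
def pvBBest (prefixes : List String) (c : String) : Option Nat :=
  prefixes.findIdx? (fun p => PySem.Str.startswith (PySem.Str.upper c) p)

def pvBCore (prefixes : List String) (columns : List String) : List String :=
  let bests := columns.map (pvBBest prefixes)
  let ranked := bests.filterMap (fun b => b)
  match PySem.List.min? ranked (fun x => x) with
  | none => []
  | some m => ((columns.zip bests).filter (fun cb => cb.2 == some m)).map (·.1)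

def find_vote_columns_py_alt (columns : List String) (elec_years : List String) (offices : List String) (party : String) : List String :=
  let prefixes := elec_years.flatMap (fun yr => offices.map (fun office => PySem.Str.upper ("G" ++ yr ++ office ++ party)))
  pvBCore prefixes columns

-- ===== PRECONDITION & SPEC =====
def Spec_find_vote_columns_py (columns : List String) (elec_years : List String) (offices : List String) (party : String) (out : List String) : Prop := out = find_vote_columns_py_alt columns elec_years offices party
instance (columns : List String) (elec_years : List String) (offices : List String) (party : String) (out : List String) : Decidable (Spec_find_vote_columns_py columns elec_years offices party out) := by unfold Spec_find_vote_columns_py; infer_instance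

-- ===== CLAIM (what is proved, stated in full; the proofs are below) =====
def Claim_equal_find_vote_columns_py : Prop := ∀ (columns : List String) (elec_years : List String) (offices : List String) (party : String), Dom_find_vote_columns_py columns elec_years offices party → Spec_find_vote_columns_py columns elec_years offices party (find_vote_columns_py columns elec_years offices party)

-- ===== LEMMAS AND PROOFS =====

-- the common reference: first nonempty filter along the prefix list
def pvFirstNE (columns : List String) : List String → List String
  | [] => []
  | p :: ps =>
    let m := columns.filter (fun c => PySem.Str.startswith (PySem.Str.upper c) p)
    if m ≠ [] then m else pvFirstNE columns ps

theorem pvFirstNE_append (columns : List String) (l1 l2 : List String) :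
    pvFirstNE columns (l1 ++ l2) =
      (if pvFirstNE columns l1 ≠ [] then pvFirstNE columns l1 else pvFirstNE columns l2) := by
  induction l1 with
  | nil => simp [pvFirstNE]
  | cons p ps ih =>
    simp only [List.cons_append, pvFirstNE]
    by_cases h : columns.filter (fun c => PySem.Str.startswith (PySem.Str.upper c) p) = []
    · simp only [h, ne_eq, not_true_eq_false, if_false]
      exact ih
    · simp only [ne_eq, h, not_false_eq_true, if_true]

theorem pvAInner_eq (columns : List String) (yr party : String) (offices : List String) :
    pvAInner columns yr party offices =
      pvFirstNE columns (offices.map (fun office => PySem.Str.upper ("G" ++ yr ++ office ++ party))) := by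
  induction offices with
  | nil => rfl
  | cons o os ih => simp only [pvAInner, List.map_cons, pvFirstNE, ih]

theorem pvAOuter_eq (columns : List String) (offices : List String) (party : String) (years : List String) :
    pvAOuter columns offices party years =
      pvFirstNE columns (years.flatMap (fun yr => offices.map (fun office => PySem.Str.upper ("G" ++ yr ++ office ++ party)))) := by
  induction years with
  | nil => rfl
  | cons y ys ih =>
    simp only [pvAOuter, List.flatMap_cons, pvFirstNE_append, pvAInner_eq, ih]

-- zip-with-own-map filter collapses to a plain filter
theorem pvZipFilter (xs : List String) (f : String → Option Nat) (m : Nat) :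
    ((xs.zip (xs.map f)).filter (fun cb => cb.2 == some m)).map (·.1) =
      xs.filter (fun x => f x == some m) := by
  induction xs with
  | nil => rfl
  | cons x t ih =>
    by_cases h : f x == some m <;> simp [h, ih]

-- shifting every rank by one commutes with collecting the ranked columns
theorem pvShiftRank (f : String → Option Nat) (xs : List String) :
    (xs.map (fun c => (f c).map (· + 1))).filterMap (fun b => b) = ((xs.map f).filterMap (fun b => b)).map (· + 1) := by
  induction xs with
  | nil => rfl
  | cons c t ih =>
    cases hb : f c
    · simp only [List.map_cons, List.filterMap_cons, hb, Option.map_none]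
      exact ih
    · simp only [List.map_cons, List.filterMap_cons, hb, Option.map_some, List.map_cons]
      rw [ih]

theorem pvFoldlMinSucc (t : List Nat) (x : Nat) :
    (t.map (· + 1)).foldl min (x + 1) = t.foldl min x + 1 := by
  induction t generalizing x with
  | nil => rfl
  | cons a t ih => simp [List.foldl_cons, ih, Nat.succ_min_succ]

theorem pvMinNilNat : PySem.List.min? ([] : List Nat) (fun x => x) = none := by
  rfl

theorem pvMinSucc (l : List Nat) :
    PySem.List.min? (l.map (· + 1)) (fun x => x) = (PySem.List.min? l (fun x => x)).map (· + 1) := by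
  cases l with
  | nil => simp [pvMinNilNat]
  | cons x t => simp [PySem.List.min?_id_cons, pvFoldlMinSucc]

theorem pvBCore_eq (prefixes columns : List String) :
    pvBCore prefixes columns = pvFirstNE columns prefixes := by
  induction prefixes generalizing columns with
  | nil =>
    have hr : (columns.map (pvBBest ([] : List String))).filterMap (fun b => b) = [] := by
      simp [pvBBest]
    simp only [pvBCore]
    rw [hr, pvMinNilNat]
    rfl
  | cons p ps ih =>
    by_cases h : columns.filter (fun c => PySem.Str.startswith (PySem.Str.upper c) p) = []
    · -- no column matches p: every best rank shifts by one and the head prefix is skipped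
      have hall : ∀ c ∈ columns, PySem.Str.startswith (PySem.Str.upper c) p = false := by
        intro c hc
        have ht := List.filter_eq_nil_iff.mp h c hc
        simpa using ht
      have hbest : ∀ c ∈ columns, pvBBest (p :: ps) c = (pvBBest ps c).map (· + 1) := by
        intro c hc
        have h1 := hall c hc
        simp only [PySem.Str.startswith_eq, PySem.Str.toList_upper] at h1
        simp [pvBBest, List.findIdx?_cons, h1]
      have hmap : columns.map (pvBBest (p :: ps)) = columns.map (fun c => (pvBBest ps c).map (· + 1)) :=
        List.map_congr_left hbest
      simp only [pvBCore]
      rw [hmap, pvShiftRank (pvBBest ps) columns, pvMinSucc]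
      cases hm : PySem.List.min? ((columns.map (pvBBest ps)).filterMap (fun b => b)) (fun x => x) with
      | none =>
        have hih := ih columns
        simp only [pvBCore, hm] at hih
        simp only [Option.map_none]
        rw [hih]
        simp only [pvFirstNE]
        rw [if_neg (not_not_intro h)]
      | some m =>
        simp only [Option.map_some]
        have hfilt : ((columns.zip (columns.map (fun c => (pvBBest ps c).map (· + 1)))).filter
              (fun cb => cb.2 == some (m + 1))).map (·.1) =
            ((columns.zip (columns.map (pvBBest ps))).filter (fun cb => cb.2 == some m)).map (·.1) := by
          rw [pvZipFilter, pvZipFilter]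
          apply List.filter_congr
          intro c hc
          cases pvBBest ps c <;> simp
        have hih := ih columns
        simp only [pvBCore, hm] at hih
        rw [hfilt, hih]
        simp only [pvFirstNE]
        rw [if_neg (not_not_intro h)]
    · -- some column matches p: the minimum rank is 0 and the result is the filter at p
      have hbest0 : ∀ c ∈ columns, (pvBBest (p :: ps) c == some 0) =
          PySem.Str.startswith (PySem.Str.upper c) p := by
        intro c _
        by_cases hs : PySem.Str.startswith (PySem.Str.upper c) p = true
        · have h1 := hs
          simp only [PySem.Str.startswith_eq, PySem.Str.toList_upper] at h1
          simp [pvBBest, List.findIdx?_cons, h1]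
        · simp only [Bool.not_eq_true] at hs
          have h1 := hs
          simp only [PySem.Str.startswith_eq, PySem.Str.toList_upper] at h1
          simp only [pvBBest, List.findIdx?_cons, h1]
          cases hfi : List.findIdx? (fun q => PySem.Chars.startswith (PySem.Chars.upper c.toList) q.toList) ps <;>
            simp [hfi, h1]
      obtain ⟨c0, hc0⟩ : ∃ c, c ∈ columns.filter (fun c => PySem.Str.startswith (PySem.Str.upper c) p) :=
        List.exists_mem_of_ne_nil _ h
      have hc0mem : c0 ∈ columns := (List.mem_filter.mp hc0).1
      have hc0s : PySem.Str.startswith (PySem.Str.upper c0) p = true := (List.mem_filter.mp hc0).2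
      have hc0s' : PySem.Chars.startswith (PySem.Chars.upper c0.toList) p.toList = true := by
        simpa using hc0s
      have h0 : (0 : Nat) ∈ (columns.map (pvBBest (p :: ps))).filterMap (fun b => b) := by
        rw [List.filterMap_map]
        simp only [Function.comp, List.mem_filterMap]
        exact ⟨c0, hc0mem, by simp [pvBBest, List.findIdx?_cons, hc0s']⟩
      have hmin : PySem.List.min? ((columns.map (pvBBest (p :: ps))).filterMap (fun b => b)) (fun x => x) = some 0 := by
        cases hm : PySem.List.min? ((columns.map (pvBBest (p :: ps))).filterMap (fun b => b)) (fun x => x) with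
        | none =>
          rw [PySem.List.min?_eq_none_iff] at hm
          rw [hm] at h0
          simp at h0
        | some m =>
          have hle : m ≤ 0 := PySem.List.min?_isMin hm 0 h0
          rw [Nat.le_zero.mp hle]
      simp only [pvBCore, hmin]
      rw [pvZipFilter]
      simp only [pvFirstNE]
      rw [if_pos h]
      exact List.filter_congr hbest0

-- ===== VERDICT (by name: the statement is the Claim_ definition above) =====
theorem find_vote_columns_py_spec : Claim_equal_find_vote_columns_py := by
  intro columns elec_years offices party _
  unfold Spec_find_vote_columns_py find_vote_columns_py find_vote_columns_py_alt
  rw [pvAOuter_eq, pvBCore_eq]
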